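-- pv_equiv track=rewrite | github.com/MrBrantCode/unitest_baseline | mut_generate/mist_train_cf/cf_2814/solution.py | move_second_to_beginning
-- ===== SOURCE A (Python) =====
-- def move_second_to_beginning(lst):
--     if len(lst) < 2:
--         return lst
--
--     second_last = lst[-2]
--     for i in range(len(lst)-2, 0, -1):
--         lst[i] = lst[i-1]
--     lst[0] = second_last
--
--     return lst
-- ===== SOURCE B (Python) =====
-- def move_second_to_beginning(lst):
--     if len(lst) < 2:
--         return lst
--     lst[:] = [lst[-2]] + lst[:-2] + [lst[-1]]
--     return lst
-- ===== Notes on version B (the rewrite author's own statement) =====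
-- stated objective: idiomatic
-- what changed: Replaces the explicit element-by-element right-shift loop with a one-shot slice-based construction (second-to-last element, then the prefix without the last two, then the last element) assigned back via slice assignment to keep the in-place mutation.
import Mathlib
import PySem

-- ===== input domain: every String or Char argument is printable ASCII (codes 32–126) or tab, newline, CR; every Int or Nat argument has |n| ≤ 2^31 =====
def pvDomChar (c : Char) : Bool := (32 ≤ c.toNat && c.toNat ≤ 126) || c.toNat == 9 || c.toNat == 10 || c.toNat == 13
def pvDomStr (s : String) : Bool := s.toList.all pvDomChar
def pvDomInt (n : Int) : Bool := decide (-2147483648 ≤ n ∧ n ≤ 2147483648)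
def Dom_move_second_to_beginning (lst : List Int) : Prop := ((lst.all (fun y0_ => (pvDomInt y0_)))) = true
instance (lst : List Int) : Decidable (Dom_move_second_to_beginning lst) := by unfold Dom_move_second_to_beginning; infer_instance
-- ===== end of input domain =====

-- B replaces A's explicit right-shift loop by a one-shot slice construction assigned back in place
-- (same values and same in-place mutation; equivalence proved about the return value).


-- ===== PORT A =====
-- literal port: guard, read lst[-2], the shifting loop over range(len-2, 0, -1), write lst[0]
def move_second_to_beginning (lst : List Int) : List Int :=
  if (PySem.List.len lst) < 2 then lst
  else
    let second_last := PySem.List.pyGetD lst (-2) 0   -- in range: length ≥ 2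
    let lst1 := (PySem.List.pyRange (PySem.List.len lst - 2) 0 (-1)).foldl
      (fun acc i => PySem.List.pySetD acc i (PySem.List.pyGetD acc (i - 1) 0)) lst
    PySem.List.pySetD lst1 0 second_last

-- ===== PORT B =====
-- literal port of Source B: singleton of the second-to-last element, then the slice without the last two, then singleton of the last element
def move_second_to_beginning_alt (lst : List Int) : List Int :=
  if (PySem.List.len lst) < 2 then lst
  else
    [PySem.List.pyGetD lst (-2) 0] ++ PySem.List.slice lst none (some (-2))
      ++ [PySem.List.pyGetD lst (-1) 0]

-- ===== PRECONDITION & SPEC =====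
def Spec_move_second_to_beginning (lst : List Int) (out : List Int) : Prop := out = move_second_to_beginning_alt lst
instance (lst : List Int) (out : List Int) : Decidable (Spec_move_second_to_beginning lst out) := by unfold Spec_move_second_to_beginning; infer_instance

-- ===== CLAIM (what is proved, stated in full; the proofs are below) =====
def Claim_equal_move_second_to_beginning : Prop := ∀ (lst : List Int), Dom_move_second_to_beginning lst → Spec_move_second_to_beginning lst (move_second_to_beginning lst)

-- ===== LEMMAS AND PROOFS =====

-- the shift loop over range(k, 0, -1): positions 1..k end up holding the old positions 0..k-1
theorem fold_shift (k : Nat) : ∀ (acc : List Int), k + 1 ≤ acc.length →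
    (PySem.List.pyRange (k : Int) 0 (-1)).foldl
      (fun acc i => PySem.List.pySetD acc i (PySem.List.pyGetD acc (i - 1) 0)) acc
    = acc.take 1 ++ acc.take k ++ acc.drop (k + 1) := by
  induction k with
  | zero =>
    intro acc h
    simp only [Nat.cast_zero]
    rw [PySem.List.pyRange_neg_one_eq_nil (by omega : (0:Int) ≤ 0)]
    simp only [List.foldl_nil, List.take_zero, List.append_nil, Nat.zero_add]
    conv_lhs => rw [← List.take_append_drop 1 acc]
  | succ k ih =>
    intro acc h
    rw [show ((k + 1 : Nat) : Int) = ((k : Int) + 1) by push_cast; ring]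
    rw [PySem.List.pyRange_neg_one_cons (by omega : (0:Int) < (k : Int) + 1)]
    rw [List.foldl_cons]
    rw [show ((k:Int) + 1 - 1) = ((k : Nat) : Int) by ring]
    rw [PySem.List.pyGetD_natCast]
    rw [show ((k:Int) + 1) = ((k + 1 : Nat) : Int) by push_cast; ring]
    rw [PySem.List.pySetD_natCast]
    rw [ih _ (by simp only [List.length_set]; omega)]
    have hk1 : k + 1 < acc.length := by omega
    have hgd : acc.getD k 0 = acc[k]'(by omega) := by
      rw [List.getD_eq_getElem?_getD, List.getElem?_eq_getElem (by omega)]; rfl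
    rw [List.take_set, List.take_set, List.drop_set]
    rw [List.set_eq_of_length_le (by simp only [List.length_take]; omega)]
    rw [List.set_eq_of_length_le (by simp only [List.length_take]; omega)]
    rw [if_neg (by omega)]
    simp only [Nat.sub_self, hgd]
    rw [List.drop_eq_getElem_cons hk1, List.set_cons_zero]
    have htk : acc.take (k + 1) = acc.take k ++ [acc[k]'(by omega)] := by
      rw [List.take_add_one, List.getElem?_eq_getElem (by omega : k < acc.length)]; rfl
    simp only [List.append_assoc, List.cons_append, List.nil_append, htk]

theorem move_second_to_beginning_eq (lst : List Int) :
    move_second_to_beginning lst = move_second_to_beginning_alt lst := by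
  unfold move_second_to_beginning move_second_to_beginning_alt
  simp only [PySem.List.len_eq]
  by_cases h : (lst.length : Int) < 2
  · rw [if_pos h, if_pos h]
  · rw [if_neg h, if_neg h]
    have hlen : 2 ≤ lst.length := by omega
    rw [show ((lst.length : Int) - 2) = ((lst.length - 2 : Nat) : Int) by push_cast [hlen]; ring]
    rw [fold_shift (lst.length - 2) lst (by omega)]
    rw [PySem.List.slice_to_neg_ofNat lst 2 (by omega)]
    rw [PySem.List.pyGetD_neg_ofNat lst 2 0 (by omega) (by omega)]
    rw [PySem.List.pyGetD_neg_ofNat lst 1 0 (by omega) (by omega)]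
    rw [show ((0:Int) = ((0:Nat):Int)) by rfl, PySem.List.pySetD_natCast]
    rw [show lst.length - 2 + 1 = lst.length - 1 by omega]
    rw [List.drop_eq_getElem_cons (by omega : lst.length - 1 < lst.length)]
    rw [show lst.length - 1 + 1 = lst.length by omega, List.drop_length]
    rw [List.take_add_one, List.take_zero, List.nil_append,
        List.getElem?_eq_getElem (by omega : 0 < lst.length)]
    simp
-- ===== VERDICT (by name: the statement is the Claim_ definition above) =====
theorem move_second_to_beginning_spec : Claim_equal_move_second_to_beginning := by
  intro lst _
  unfold Spec_move_second_to_beginning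
  exact move_second_to_beginning_eq lst
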